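-- pv_equiv track=rewrite | github.com/SeunghoCuber/CircuitSensei | circuit_sensei/agent.py | equivalent_holes
-- ===== SOURCE A (Python) =====
-- TOP_BANK_ROWS = tuple("ABCDE")
--
-- BOTTOM_BANK_ROWS = tuple("FGHIJ")
--
-- def equivalent_holes(row: str, col: int) -> list[tuple[str, int]]:
--     """Return other holes electrically common with ``row``/``col``."""
--
--     normalized = row.upper().strip()
--     if normalized in TOP_BANK_ROWS:
--         rows = _rotated_rows(TOP_BANK_ROWS, normalized)
--     elif normalized in BOTTOM_BANK_ROWS:
--         rows = _rotated_rows(BOTTOM_BANK_ROWS, normalized)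
--     else:
--         rows = (normalized,)
--     return [(candidate, col) for candidate in rows]
--
-- def _rotated_rows(rows: tuple[str, ...], first: str) -> tuple[str, ...]:
--     index = rows.index(first)
--     return rows[index:] + rows[:index]
-- ===== SOURCE B (Python) =====
-- # B: closed-form character arithmetic (ord/chr modular rotation) instead of
-- # tuple membership + index + slice rotation; no tables, no slicing.
-- def equivalent_holes(row: str, col: int) -> list[tuple[str, int]]:
--     normalized = row.upper().strip()
--     if len(normalized) == 1 and 'A' <= normalized <= 'J':
--         o = ord(normalized) - ord('A')
--         base = 5 * (o // 5)
--         return [(chr(ord('A') + base + (o + k) % 5), col) for k in range(5)]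
--     return [(normalized, col)]
-- ===== Notes on version B (the rewrite author's own statement) =====
-- stated objective: alternative
-- what changed: Replaced the bank tuples with closed-form character arithmetic: the rotated row letters are computed directly as chr(ord('A') + 5*(o//5) + (o+k)%5) for k in 0..4, so tuple membership, .index and slice rotation disappear.
import Mathlib
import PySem

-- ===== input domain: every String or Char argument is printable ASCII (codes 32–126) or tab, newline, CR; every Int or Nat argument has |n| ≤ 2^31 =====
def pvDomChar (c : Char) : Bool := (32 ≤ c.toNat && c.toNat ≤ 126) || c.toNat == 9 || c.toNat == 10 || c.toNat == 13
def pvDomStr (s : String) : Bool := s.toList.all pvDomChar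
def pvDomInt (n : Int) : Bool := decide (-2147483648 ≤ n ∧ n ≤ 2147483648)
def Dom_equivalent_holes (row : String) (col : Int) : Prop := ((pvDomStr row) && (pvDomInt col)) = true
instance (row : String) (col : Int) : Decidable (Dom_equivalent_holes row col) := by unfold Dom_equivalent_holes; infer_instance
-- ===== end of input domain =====

-- B computes the rotated bank rows by closed-form ord/chr modular arithmetic instead of
-- A's tuple membership + index + slice rotation; objective: alternative.

-- ===== PORT A =====
def pvTopBankRows : List String := ["A", "B", "C", "D", "E"]

def pvBottomBankRows : List String := ["F", "G", "H", "I", "J"]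

-- tuple.index raises ValueError when absent; both call sites guard membership, so none is unreachable
def pvRotatedRows (rows : List String) (first : String) : List String :=
  match PySem.List.index? rows first with
  | some i => PySem.List.slice rows (some (i : Int)) none ++ PySem.List.slice rows none (some (i : Int))
  | none => []

def equivalent_holes (row : String) (col : Int) : List (String × Int) :=
  let normalized := PySem.Str.strip (PySem.Str.upper row)
  let rows :=
    if normalized ∈ pvTopBankRows then pvRotatedRows pvTopBankRows normalized
    else if normalized ∈ pvBottomBankRows then pvRotatedRows pvBottomBankRows normalized
    else [normalized]
  rows.map (fun candidate => (candidate, col))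

-- ===== PORT B =====
-- len(normalized) == 1 and 'A' <= normalized <= 'J' on a 1-char string = char comparison
def equivalent_holes_alt (row : String) (col : Int) : List (String × Int) :=
  let normalized := PySem.Str.strip (PySem.Str.upper row)
  match normalized.toList with
  | [c] =>
    if 'A' ≤ c ∧ c ≤ 'J' then
      let o : Int := (c.toNat : Int) - 65
      let base : Int := 5 * (PySem.Int.floordiv o 5)
      (PySem.List.pyRange 0 5 1).map
        (fun k => (String.ofList [Char.ofNat (65 + base + PySem.Int.mod (o + k) 5).toNat], col))
    else [(normalized, col)]
  | _ => [(normalized, col)]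

-- ===== PRECONDITION & SPEC =====
def Spec_equivalent_holes (row : String) (col : Int) (out : List (String × Int)) : Prop := out = equivalent_holes_alt row col
instance (row : String) (col : Int) (out : List (String × Int)) : Decidable (Spec_equivalent_holes row col out) := by unfold Spec_equivalent_holes; infer_instance

-- ===== CLAIM =====
def Claim_equal_equivalent_holes : Prop := ∀ (row : String) (col : Int), Dom_equivalent_holes row col → Spec_equivalent_holes row col (equivalent_holes row col)

-- ===== LEMMAS AND PROOFS =====
-- both sides depend on row only through n := strip (upper row); compare them for every n
theorem core_eq (n : String) (col : Int) :
    (if n ∈ pvTopBankRows then pvRotatedRows pvTopBankRows n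
     else if n ∈ pvBottomBankRows then pvRotatedRows pvBottomBankRows n
     else [n]).map (fun c => (c, col))
    = (match n.toList with
       | [c] =>
         if 'A' ≤ c ∧ c ≤ 'J' then
           let o : Int := (c.toNat : Int) - 65
           let base : Int := 5 * (PySem.Int.floordiv o 5)
           (PySem.List.pyRange 0 5 1).map
             (fun k => (String.ofList [Char.ofNat (65 + base + PySem.Int.mod (o + k) 5).toNat], col))
         else [(n, col)]
       | _ => [(n, col)]) := by
  by_cases hA : n = "A"; · subst hA; rfl
  by_cases hB : n = "B"; · subst hB; rfl
  by_cases hC : n = "C"; · subst hC; rfl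
  by_cases hD : n = "D"; · subst hD; rfl
  by_cases hE : n = "E"; · subst hE; rfl
  by_cases hF : n = "F"; · subst hF; rfl
  by_cases hG : n = "G"; · subst hG; rfl
  by_cases hH : n = "H"; · subst hH; rfl
  by_cases hI : n = "I"; · subst hI; rfl
  by_cases hJ : n = "J"; · subst hJ; rfl
  have hnot : n ∉ pvTopBankRows ∧ n ∉ pvBottomBankRows := by
    simp [pvTopBankRows, pvBottomBankRows, hA, hB, hC, hD, hE, hF, hG, hH, hI, hJ]
  rw [if_neg hnot.1, if_neg hnot.2]
  match hl : n.toList with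
  | [] => rfl
  | c :: c' :: rest => rfl
  | [c] =>
    have hn : n = String.ofList [c] := by
      apply String.toList_inj.mp; simp [hl]
    have hcond : ¬ ('A' ≤ c ∧ c ≤ 'J') := by
      rintro ⟨h1, h2⟩
      have h1' : 65 ≤ c.toNat := h1
      have h2' : c.toNat ≤ 74 := h2
      have hd : c.toNat = 65 ∨ c.toNat = 66 ∨ c.toNat = 67 ∨ c.toNat = 68 ∨ c.toNat = 69 ∨ c.toNat = 70 ∨ c.toNat = 71 ∨ c.toNat = 72 ∨ c.toNat = 73 ∨ c.toNat = 74 := by omega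
      rcases hd with h|h|h|h|h|h|h|h|h|h
      · exact hA (by rw [hn, show c = 'A' by rw [← Char.ofNat_toNat c, h]])
      · exact hB (by rw [hn, show c = 'B' by rw [← Char.ofNat_toNat c, h]])
      · exact hC (by rw [hn, show c = 'C' by rw [← Char.ofNat_toNat c, h]])
      · exact hD (by rw [hn, show c = 'D' by rw [← Char.ofNat_toNat c, h]])
      · exact hE (by rw [hn, show c = 'E' by rw [← Char.ofNat_toNat c, h]])
      · exact hF (by rw [hn, show c = 'F' by rw [← Char.ofNat_toNat c, h]])
      · exact hG (by rw [hn, show c = 'G' by rw [← Char.ofNat_toNat c, h]])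
      · exact hH (by rw [hn, show c = 'H' by rw [← Char.ofNat_toNat c, h]])
      · exact hI (by rw [hn, show c = 'I' by rw [← Char.ofNat_toNat c, h]])
      · exact hJ (by rw [hn, show c = 'J' by rw [← Char.ofNat_toNat c, h]])
    simp [hcond]

-- ===== VERDICT =====
theorem equivalent_holes_spec : Claim_equal_equivalent_holes := by
  intro row col _
  unfold Spec_equivalent_holes equivalent_holes equivalent_holes_alt
  exact core_eq (PySem.Str.strip (PySem.Str.upper row)) col
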